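-- pv_equiv track=rewrite | github.com/guige2023/rabai_autoclick | actions/data_splitter_action.py | _merge_intersection
-- ===== SOURCE A (Python) =====
-- from typing import Any, Dict, List, Optional, Tuple, Callable
--
-- def _merge_intersection(sources: List) -> List[Dict]:
--     """Intersection merge - items in all sources."""
--     if not sources:
--         return []
--
--     sets = []
--     for source in sources:
--         keys = set()
--         for item in source:
--             if isinstance(item, dict) and 'id' in item:
--                 keys.add(item['id'])
--         sets.append(keys)
--
--     common_keys = sets[0].intersection(*sets[1:])
--
--     result = []
--     for item in sources[0]:
--         if isinstance(item, dict) and item.get('id') in common_keys: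
--             result.append(item)
--
--     return result
-- ===== SOURCE B (Python) =====
-- from typing import Dict, List
--
--
-- def _merge_intersection(sources: List) -> List[Dict]:
--     """Intersection merge - items in all sources (progressive refinement:
--     filter the surviving candidates of sources[0] through each later source)."""
--     if not sources:
--         return []
--     result = [item for item in sources[0]
--               if isinstance(item, dict) and 'id' in item]
--     for source in sources[1:]:
--         ids = {item['id'] for item in source
--                if isinstance(item, dict) and 'id' in item}
--         result = [item for item in result if item['id'] in ids]
--     return result
-- ===== Notes on version B (the rewrite author's own statement) =====
-- stated objective: alternative
-- what changed: Replaces build-all-id-sets-then-intersect-then-rescan with progressive refinement: start from the id-bearing items of sources[0] and filter that surviving candidate list through each later source's ids, so no global intersection set and no final scan exist.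
import Mathlib
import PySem

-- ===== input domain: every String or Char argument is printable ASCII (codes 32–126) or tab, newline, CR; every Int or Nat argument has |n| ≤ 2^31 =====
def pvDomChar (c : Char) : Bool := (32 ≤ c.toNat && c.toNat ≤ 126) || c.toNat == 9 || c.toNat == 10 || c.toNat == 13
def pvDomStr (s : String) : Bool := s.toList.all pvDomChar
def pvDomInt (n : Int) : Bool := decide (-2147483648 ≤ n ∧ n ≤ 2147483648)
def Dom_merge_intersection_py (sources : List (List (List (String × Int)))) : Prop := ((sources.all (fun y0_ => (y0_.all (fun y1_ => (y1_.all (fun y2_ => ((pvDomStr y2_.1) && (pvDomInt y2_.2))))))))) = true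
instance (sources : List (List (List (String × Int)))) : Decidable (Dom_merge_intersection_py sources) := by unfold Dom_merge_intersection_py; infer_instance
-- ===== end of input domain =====

-- B replaces set-intersection-then-rescan by progressive refinement of the candidate list; equal output proved.

-- ===== PORT A =====
-- "keys = set(); for item in source: if 'id' in item: keys.add(item['id'])"
def pvIdsA (source : List (List (String × Int))) : PySem.Set Int :=
  source.foldl
    (fun keys item =>
      match (PySem.Dict.mk item).get? "id" with
      | some v => PySem.Set.add keys v
      | none => keys)
    PySem.Set.empty

def merge_intersection_py (sources : List (List (List (String × Int)))) : List (List (String × Int)) :=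
  if sources = [] then []
  else
    let sets := sources.foldl (fun acc source => acc ++ [pvIdsA source]) []
    let common := (sets.drop 1).foldl PySem.Set.inter (sets.headD PySem.Set.empty)
    (sources.headD []).foldl
      (fun res item =>
        if (match (PySem.Dict.mk item).get? "id" with
            | some v => PySem.Set.contains common v
            | none => false) then res ++ [item] else res)
      []

-- ===== PORT B =====
-- "{item['id'] for item in source if isinstance(item, dict) and 'id' in item}"
def pvIdSetB (source : List (List (String × Int))) : PySem.Set Int :=
  PySem.Set.ofList (source.filterMap (fun item => (PySem.Dict.mk item).get? "id"))

def merge_intersection_py_alt (sources : List (List (List (String × Int)))) : List (List (String × Int)) :=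
  match sources with
  | [] => []
  | s0 :: rest =>
    let init := s0.filter (fun item => ((PySem.Dict.mk item).get? "id").isSome)
    rest.foldl
      (fun result source =>
        -- "result = [item for item in result if item['id'] in ids]"; every surviving item
        -- has 'id' (invariant from init), so the 'none' branch is unreachable
        result.filter (fun item =>
          match (PySem.Dict.mk item).get? "id" with
          | some v => PySem.Set.contains (pvIdSetB source) v
          | none => false))
      init

-- ===== PRECONDITION & SPEC =====
def Spec_merge_intersection_py (sources : List (List (List (String × Int)))) (out : List (List (String × Int))) : Prop := out = merge_intersection_py_alt sources
instance (sources : List (List (List (String × Int)))) (out : List (List (String × Int))) : Decidable (Spec_merge_intersection_py sources out) := by unfold Spec_merge_intersection_py; infer_instance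

-- ===== CLAIM (what is proved, stated in full; the proofs are below) =====
def Claim_equal_merge_intersection_py : Prop := ∀ (sources : List (List (List (String × Int)))), Dom_merge_intersection_py sources → Spec_merge_intersection_py sources (merge_intersection_py sources)

-- ===== LEMMAS AND PROOFS =====

-- membership in the left fold of set-intersections (A's common_keys)
theorem pv_mem_foldl_inter (l : List (PySem.Set Int)) (s : PySem.Set Int) (v : Int) :
    v ∈ l.foldl PySem.Set.inter s ↔ v ∈ s ∧ ∀ t ∈ l, v ∈ t := by
  induction l generalizing s with
  | nil => simp
  | cons t l ih =>
    simp [List.foldl_cons, ih, PySem.Set.mem_inter]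
    tauto

-- characterisation of A's per-source id set
theorem pv_mem_pvIdsA (source : List (List (String × Int))) (v : Int) :
    v ∈ pvIdsA source ↔ ∃ item ∈ source, (PySem.Dict.mk item).get? "id" = some v := by
  unfold pvIdsA
  have h : ∀ (src : List (List (String × Int))) (init : PySem.Set Int),
      v ∈ src.foldl (fun keys item =>
        match (PySem.Dict.mk item).get? "id" with
        | some w => PySem.Set.add keys w
        | none => keys) init
      ↔ v ∈ init ∨ ∃ item ∈ src, (PySem.Dict.mk item).get? "id" = some v := by
    intro src
    induction src with
    | nil => simp
    | cons it tl ih =>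
      intro init
      simp only [List.foldl_cons]
      cases hid : (PySem.Dict.mk it).get? "id" with
      | none =>
        simp only [ih, List.mem_cons]
        constructor
        · rintro (h | ⟨item, hm, he⟩)
          · exact Or.inl h
          · exact Or.inr ⟨item, Or.inr hm, he⟩
        · rintro (h | ⟨item, (rfl | hm), he⟩)
          · exact Or.inl h
          · rw [hid] at he; cases he
          · exact Or.inr ⟨item, hm, he⟩
      | some w =>
        simp only [ih, PySem.Set.mem_add, List.mem_cons]
        constructor
        · rintro (⟨h | rfl⟩ | ⟨item, hm, he⟩)
          · exact Or.inl h
          · exact Or.inr ⟨it, Or.inl rfl, hid⟩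
          · exact Or.inr ⟨item, Or.inr hm, he⟩
        · rintro (h | ⟨item, (rfl | hm), he⟩)
          · exact Or.inl (Or.inl h)
          · rw [hid] at he; cases he; exact Or.inl (Or.inr rfl)
          · exact Or.inr ⟨item, hm, he⟩
  simpa using h source PySem.Set.empty

-- characterisation of B's per-source id set
theorem pv_mem_pvIdSetB (source : List (List (String × Int))) (v : Int) :
    v ∈ pvIdSetB source ↔ ∃ item ∈ source, (PySem.Dict.mk item).get? "id" = some v := by
  unfold pvIdSetB
  simp [PySem.Set.mem_ofList, List.mem_filterMap]

-- a fold of filters is one filter by the conjunction of all tests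
theorem pv_foldl_filter {σ α : Type} (l : List σ) (init : List α) (p : σ → α → Bool) :
    l.foldl (fun r s => r.filter (p s)) init = init.filter (fun x => l.all (fun s => p s x)) := by
  induction l generalizing init with
  | nil => simp
  | cons s tl ih =>
    simp only [List.foldl_cons, ih, List.filter_filter, List.all_cons]
    exact List.filter_congr (fun x _ => by rw [Bool.and_comm])

-- ===== VERDICT (by name: the statement is the Claim_ definition above) =====
theorem merge_intersection_py_spec : Claim_equal_merge_intersection_py := by
  intro sources _
  unfold Spec_merge_intersection_py
  cases sources with
  | nil => rfl
  | cons s0 rest =>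
    unfold merge_intersection_py merge_intersection_py_alt
    simp only [if_neg (List.cons_ne_nil s0 rest)]
    rw [PySem.List.foldl_append_singleton_eq_map]
    simp only [List.nil_append, List.map_cons, List.drop_succ_cons, List.drop_zero,
      List.headD_cons]
    refine Eq.trans (PySem.List.foldl_append_if_eq_filter _ s0 []) ?_
    simp only [List.nil_append, pv_foldl_filter, List.filter_filter]
    apply List.filter_congr
    intro item hmem
    cases hid : (PySem.Dict.mk item).get? "id" with
    | none => simp
    | some v =>
      simp only [Option.isSome_some, Bool.and_true]
      rw [Bool.eq_iff_iff, PySem.Set.contains_iff, pv_mem_foldl_inter, List.all_eq_true]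
      constructor
      · rintro ⟨h0, hr⟩
        intro s hs
        simp only [PySem.Set.contains_iff, pv_mem_pvIdSetB]
        have : v ∈ pvIdsA s := hr (pvIdsA s) (List.mem_map.mpr ⟨s, hs, rfl⟩)
        exact (pv_mem_pvIdsA s v).mp this
      · intro h
        refine ⟨(pv_mem_pvIdsA s0 v).mpr ⟨item, hmem, hid⟩, ?_⟩
        intro t ht
        rcases List.mem_map.mp ht with ⟨s, hs, rfl⟩
        have := h s hs
        simp only [PySem.Set.contains_iff, pv_mem_pvIdSetB] at this
        exact (pv_mem_pvIdsA s v).mpr this
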